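-- pv_equiv track=rewrite | github.com/sorojasp/DbFunctionalDependencesPyhton | m1M2.py | ordenaCombinaciones
-- ===== SOURCE A (Python) =====
-- def ordenaCombinaciones(c):
--
--     combinacionesOrdenadas=[];
--     """Imprime en la salida estándar todos los
--        subconjuntos del conjunto c (una lista de
--        listas) ordenados primero por tamaño y
--        luego lexicográficamente. Cada subconjunto
--        se imprime en su propia línea. Los
--        elementos de los subconjuntos deben ser
--        comparables entre sí, de otra forma puede
--        ocurrir un TypeError.
--     """
--     for e in sorted(c, key=lambda s: (len(s), s)):
--
--         combinacionesOrdenadas.append(e);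
--     return combinacionesOrdenadas
-- ===== SOURCE B (Python) =====
-- def ordenaCombinaciones(c):
--     """Incremental insertion sort: insert each subset into its ordered place
--     (by size, then lexicographically) in the growing result list."""
--     combinacionesOrdenadas = []
--     for s in c:
--         i = 0
--         while i < len(combinacionesOrdenadas) and \
--                 (len(combinacionesOrdenadas[i]), combinacionesOrdenadas[i]) <= (len(s), s):
--             i += 1
--         combinacionesOrdenadas.insert(i, s)
--     return combinacionesOrdenadas
-- ===== Notes on version B (the rewrite author's own statement) =====
-- stated objective: alternative
-- what changed: B replaces A's single composite-key library sort by an incremental insertion sort: each subset is inserted into its ordered position (by size, then lexicographically) in the growing result list.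
import Mathlib
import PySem

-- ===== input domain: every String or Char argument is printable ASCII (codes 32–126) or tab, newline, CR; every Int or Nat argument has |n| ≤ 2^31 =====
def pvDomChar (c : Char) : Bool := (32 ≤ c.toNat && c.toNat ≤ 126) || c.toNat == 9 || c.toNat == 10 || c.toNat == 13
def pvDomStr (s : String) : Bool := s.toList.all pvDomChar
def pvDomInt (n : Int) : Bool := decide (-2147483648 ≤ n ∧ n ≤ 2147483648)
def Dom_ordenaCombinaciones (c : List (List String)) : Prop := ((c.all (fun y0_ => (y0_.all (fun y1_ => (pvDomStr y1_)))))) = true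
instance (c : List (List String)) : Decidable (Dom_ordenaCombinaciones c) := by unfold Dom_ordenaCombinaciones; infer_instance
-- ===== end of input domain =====

-- B replaces A's single composite-key library sort by an incremental insertion sort
-- (each subset inserted into its ordered place by size, then lexicographically); alternative algorithm, same result.


-- ===== PORT A =====
def ordenaCombinaciones (c : List (List String)) : List (List String) :=
  (PySem.List.sorted2 c (fun s => PySem.List.len s) (fun s => s)).foldl
    (fun acc e => acc ++ [e]) []

-- ===== PORT B =====
-- the Python tuple comparison (len a, a) <= (len b, b)
def pvLeKey (a b : List String) : Bool :=
  decide (toLex (PySem.List.len a, a) ≤ toLex (PySem.List.len b, b))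

-- the while-loop + list.insert of Source B: walk past the prefix whose keys are <= s's key, put s there
def pvInsertar (s : List String) : List (List String) → List (List String)
  | [] => [s]
  | r :: rs => if pvLeKey r s then r :: pvInsertar s rs else s :: r :: rs

def ordenaCombinaciones_alt (c : List (List String)) : List (List String) :=
  c.foldl (fun res s => pvInsertar s res) []

-- ===== PRECONDITION & SPEC =====
def Spec_ordenaCombinaciones (c : List (List String)) (out : List (List String)) : Prop := out = ordenaCombinaciones_alt c
instance (c : List (List String)) (out : List (List String)) : Decidable (Spec_ordenaCombinaciones c out) := by unfold Spec_ordenaCombinaciones; infer_instance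

-- ===== CLAIM (what is proved, stated in full; the proofs are below) =====
def Claim_equal_ordenaCombinaciones : Prop := ∀ (c : List (List String)), Dom_ordenaCombinaciones c → Spec_ordenaCombinaciones c (ordenaCombinaciones c)

-- ===== LEMMAS AND PROOFS =====

-- the composite sort key of A, as a lexicographic pair
def pvKey (s : List String) : Lex (Int × List String) := toLex (PySem.List.len s, s)

lemma pvKey_inj : Function.Injective pvKey := by
  intro a b h
  simpa using congrArg (fun x => (ofLex x).2) h

lemma sorted2_eq_sorted_lex (c : List (List String)) :
    PySem.List.sorted2 c (fun s => PySem.List.len s) (fun s => s)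
      = PySem.List.sorted c pvKey := by
  simp only [PySem.List.sorted2, PySem.List.sorted, if_neg (by decide : ¬ (false = true))]
  congr 1
  funext acc x
  congr 1
  funext a b
  rw [Bool.eq_iff_iff]
  simp only [Bool.or_eq_true, Bool.and_eq_true, Bool.not_eq_eq_eq_not, Bool.not_true,
    decide_eq_true_eq, decide_eq_false_iff_not, pvKey, Prod.Lex.lt_iff, ofLex_toLex]
  constructor
  · rintro (h | ⟨h1, h2⟩)
    · exact Or.inl h
    · by_cases hlt : PySem.List.len a < PySem.List.len b
      · exact Or.inl hlt
      · exact Or.inr ⟨le_antisymm (not_lt.mp h1) (not_lt.mp hlt), h2⟩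
  · rintro (h | ⟨h1, h2⟩)
    · exact Or.inl h
    · exact Or.inr ⟨by rw [h1]; exact lt_irrefl _, h2⟩

lemma A_eq (c : List (List String)) :
    ordenaCombinaciones c = PySem.List.sorted c pvKey := by
  unfold ordenaCombinaciones
  rw [PySem.List.foldl_append_singleton_eq_self, List.nil_append, sorted2_eq_sorted_lex]

lemma pvLeKey_iff (a b : List String) : pvLeKey a b = true ↔ pvKey a ≤ pvKey b := by
  simp [pvLeKey, pvKey]

lemma insert_perm (s : List String) : ∀ l, (pvInsertar s l).Perm (s :: l) := by
  intro l
  induction l with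
  | nil => simp [pvInsertar]
  | cons r rs ih =>
    unfold pvInsertar
    split_ifs
    · exact (ih.cons r).trans (List.Perm.swap s r rs)
    · exact List.Perm.refl _

lemma B_perm_aux (c : List (List String)) : ∀ acc : List (List String),
    (c.foldl (fun res s => pvInsertar s res) acc).Perm (c ++ acc) := by
  induction c with
  | nil => intro acc; simp
  | cons s cs ih =>
    intro acc
    simp only [List.foldl_cons, List.cons_append]
    refine (ih (pvInsertar s acc)).trans ?_
    refine (List.Perm.append_left cs (insert_perm s acc)).trans ?_
    exact (List.perm_append_comm_assoc cs [s] acc).trans (by simp)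

lemma B_perm (c : List (List String)) : (ordenaCombinaciones_alt c).Perm c := by
  unfold ordenaCombinaciones_alt
  simpa using B_perm_aux c []

lemma insert_pairwise (s : List String) : ∀ l : List (List String),
    l.Pairwise (fun a b => pvKey a ≤ pvKey b) →
    (pvInsertar s l).Pairwise (fun a b => pvKey a ≤ pvKey b) := by
  intro l
  induction l with
  | nil => intro _; simp [pvInsertar]
  | cons r rs ih =>
    intro h
    have h' := List.pairwise_cons.mp h
    unfold pvInsertar
    split_ifs with hrs
    · refine List.pairwise_cons.mpr ⟨?_, ih h'.2⟩
      intro x hx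
      have hx' : x ∈ s :: rs := (insert_perm s rs).mem_iff.mp hx
      rcases List.mem_cons.mp hx' with hxs | hxr
      · exact hxs ▸ (pvLeKey_iff r s).mp hrs
      · exact h'.1 x hxr
    · have hsr : pvKey s ≤ pvKey r :=
        le_of_not_ge (fun hge => hrs ((pvLeKey_iff r s).mpr hge))
      refine List.pairwise_cons.mpr ⟨?_, h⟩
      intro x hx
      rcases List.mem_cons.mp hx with hxr | hxrs
      · exact hxr ▸ hsr
      · exact hsr.trans (h'.1 x hxrs)

lemma B_pairwise_aux (c : List (List String)) : ∀ acc : List (List String),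
    acc.Pairwise (fun a b => pvKey a ≤ pvKey b) →
    (c.foldl (fun res s => pvInsertar s res) acc).Pairwise (fun a b => pvKey a ≤ pvKey b) := by
  induction c with
  | nil => intro acc h; simpa using h
  | cons s cs ih =>
    intro acc h
    exact ih (pvInsertar s acc) (insert_pairwise s acc h)

lemma B_pairwise (c : List (List String)) :
    (ordenaCombinaciones_alt c).Pairwise (fun a b => pvKey a ≤ pvKey b) := by
  unfold ordenaCombinaciones_alt
  exact B_pairwise_aux c [] (by simp)

-- ===== VERDICT (by name: the statement is the Claim_ definition above) =====
theorem ordenaCombinaciones_spec : Claim_equal_ordenaCombinaciones := by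
  unfold Claim_equal_ordenaCombinaciones
  intro c _
  unfold Spec_ordenaCombinaciones
  refine PySem.List.eq_of_perm_of_pairwise_le_of_injective pvKey pvKey_inj
    ?_ ?_ (B_pairwise c)
  · rw [A_eq]
    exact (PySem.List.sorted_perm c pvKey false).trans (B_perm c).symm
  · rw [A_eq]; exact PySem.List.sorted_pairwise c pvKey
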